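-- pv_equiv track=rewrite | github.com/Adam-Jimenez/binarysearch-editorials | Reverse Words Sequel.py | solve
-- ===== SOURCE A (Python) =====
-- from itertools import groupby
--
-- def solve(sentence, delimiters):
--     words=[]
--     ans=""
--     for k,g in groupby(sentence, lambda x: x in delimiters):
--         if not k:
--             words.append("".join(g))
--     for k,g in groupby(sentence, lambda x: x in delimiters):
--         if k:
--             ans+="".join(g)
--         else:
--             ans+=words.pop()
--     return ans
-- ===== SOURCE B (Python) =====
-- def solve(sentence, delimiters):
--     # Two-pointer peeling: repeatedly strip the first and last word (with the
--     # surrounding delimiter runs) from the remaining core and emit them swapped,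
--     # building the answer from both ends inward.  No grouping of the whole
--     # string into runs is ever materialised.
--     def span(s, want_delim):
--         i = 0
--         while i < len(s) and (s[i] in delimiters) == want_delim:
--             i += 1
--         return s[:i], s[i:]
--
--     front = []
--     back = []
--     cur = sentence
--     while True:
--         lead, rest = span(cur, True)
--         if not rest:                      # no word left: core is all delimiters
--             front.append(lead)
--             break
--         w1, rest2 = span(rest, False)     # first word
--         rev = rest2[::-1]
--         trail_r, r2 = span(rev, True)     # trailing delimiter run (reversed)
--         if not r2:                        # exactly one word left
--             front.append(lead + w1 + trail_r[::-1])
--             break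
--         wlast_r, mid_r = span(r2, False)  # last word (reversed)
--         front.append(lead + wlast_r[::-1])
--         back.append(w1 + trail_r[::-1])
--         cur = mid_r[::-1]
--     return "".join(front) + "".join(reversed(back))
-- ===== Notes on version B (the rewrite author's own statement) =====
-- stated objective: alternative
-- what changed: B never groups the sentence into runs: a two-ended loop repeatedly peels the first word (with its leading delimiter run) off the front and the last word (with its trailing delimiter run) off the back of the remaining core, emitting them swapped into front/back accumulators, instead of A's two full groupby scans with a destructive words.pop().
import Mathlib
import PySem

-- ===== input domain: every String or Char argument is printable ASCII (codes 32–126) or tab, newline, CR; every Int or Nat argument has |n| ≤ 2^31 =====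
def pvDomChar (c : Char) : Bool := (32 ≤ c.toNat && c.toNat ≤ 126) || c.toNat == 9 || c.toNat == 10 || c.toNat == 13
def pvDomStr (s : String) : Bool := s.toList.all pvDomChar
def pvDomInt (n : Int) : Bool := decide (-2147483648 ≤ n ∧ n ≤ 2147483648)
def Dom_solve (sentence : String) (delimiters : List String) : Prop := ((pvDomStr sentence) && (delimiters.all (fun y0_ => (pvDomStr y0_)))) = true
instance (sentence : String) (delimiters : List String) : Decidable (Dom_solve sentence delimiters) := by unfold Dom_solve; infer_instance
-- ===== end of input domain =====

-- B peels the first and last word off the remaining core in a two-ended loop and emits them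
-- swapped, instead of A's two groupby scans with words.pop() (objective: alternative algorithm).


-- ===== PORT A =====
-- 'x in delimiters' with x a character of the sentence
def pvKey (delimiters : List String) (c : Char) : Bool := delimiters.contains (String.ofList [c])

-- itertools.groupby over the characters with the boolean key: maximal runs (key, run)
def pvGroupBy (key : Char → Bool) : List Char → List (Bool × List Char)
  | [] => []
  | c :: cs =>
    match pvGroupBy key cs with
    | [] => [(key c, [c])]
    | (k, g) :: rest =>
      if key c = k then (key c, c :: g) :: rest
      else (key c, [c]) :: (k, g) :: rest

-- second loop body of A: ans += "".join(g) for delimiter runs, else ans += words.pop()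
def pvStepA (st : List (List Char) × List Char) (p : Bool × List Char) : List (List Char) × List Char :=
  if p.1 then (st.1, st.2 ++ p.2)
  else match PySem.List.pop? st.1 (-1) with
    | some (w, rest) => (rest, st.2 ++ w)
    | none => (st.1, st.2)   -- unreachable: one word per non-delimiter run

def solve (sentence : String) (delimiters : List String) : String :=
  let groups := pvGroupBy (pvKey delimiters) sentence.toList
  let words := groups.foldl (fun ws p => if !p.1 then ws ++ [p.2] else ws) []
  String.ofList (groups.foldl pvStepA (words, [])).2

-- ===== PORT B =====
-- span(s, want): longest prefix whose chars have key = want, and the rest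
def pvSpan (key : Char → Bool) (want : Bool) : List Char → List Char × List Char
  | [] => ([], [])
  | c :: cs =>
    if key c = want then
      let p := pvSpan key want cs; (c :: p.1, p.2)
    else ([], c :: cs)

-- lemmas the port needs for termination
theorem pvSpan_cons_pos (key : Char → Bool) (want : Bool) (c : Char) (cs : List Char)
    (h : key c = want) :
    pvSpan key want (c :: cs) = (c :: (pvSpan key want cs).1, (pvSpan key want cs).2) := by
  simp [pvSpan, h]

theorem pvSpan_cons_neg (key : Char → Bool) (want : Bool) (c : Char) (cs : List Char)
    (h : ¬ key c = want) : pvSpan key want (c :: cs) = ([], c :: cs) := by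
  simp [pvSpan, h]

theorem pvSpan_snd_length (key : Char → Bool) (want : Bool) (l : List Char) :
    (pvSpan key want l).2.length ≤ l.length := by
  induction l with
  | nil => simp [pvSpan]
  | cons c cs ih =>
    by_cases h : key c = want
    · rw [pvSpan_cons_pos key want c cs h]; simp; omega
    · rw [pvSpan_cons_neg key want c cs h]

theorem pvSpan_snd_head (key : Char → Bool) (want : Bool) (l : List Char) (c : Char)
    (cs : List Char) (h : (pvSpan key want l).2 = c :: cs) : key c = !want := by
  induction l with
  | nil => simp [pvSpan] at h
  | cons a l' ih =>
    by_cases ha : key a = want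
    · rw [pvSpan_cons_pos key want a l' ha] at h; exact ih h
    · rw [pvSpan_cons_neg key want a l' ha] at h
      cases h
      cases want <;> simp_all

theorem pvSpan_snd_lt (key : Char → Bool) (want : Bool) (c : Char) (cs : List Char)
    (h : key c = want) : (pvSpan key want (c :: cs)).2.length < (c :: cs).length := by
  rw [pvSpan_cons_pos key want c cs h]
  have := pvSpan_snd_length key want cs
  simp; omega

theorem pvLoop_dec (key : Char → Bool) (cur : List Char)
    (h1 : ¬ (pvSpan key true cur).2 = []) :
    ((pvSpan key false ((pvSpan key true ((pvSpan key false (pvSpan key true cur).2).2.reverse)).2)).2).reverse.length < cur.length := by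
  obtain ⟨c, cs, hc⟩ := List.exists_cons_of_ne_nil h1
  have hkc : key c = false := by simpa using pvSpan_snd_head key true cur c cs hc
  have h2 : (pvSpan key false (pvSpan key true cur).2).2.length < (pvSpan key true cur).2.length := by
    rw [hc]; exact pvSpan_snd_lt key false c cs hkc
  have h3 := pvSpan_snd_length key true cur
  have h4 := pvSpan_snd_length key true (pvSpan key false (pvSpan key true cur).2).2.reverse
  have h5 := pvSpan_snd_length key false ((pvSpan key true ((pvSpan key false (pvSpan key true cur).2).2.reverse)).2)
  simp only [List.length_reverse] at *
  omega

-- the main loop of B: peel leading delims + first word from the front and the last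
-- word + trailing delims from the back; recurse on the middle
def pvLoopB (key : Char → Bool) (cur : List Char) (front back : List (List Char)) :
    List (List Char) × List (List Char) :=
  let lead := (pvSpan key true cur).1
  let rest := (pvSpan key true cur).2
  if h1 : rest = [] then (front ++ [lead], back)
  else
    let w1 := (pvSpan key false rest).1
    let rest2 := (pvSpan key false rest).2
    let rev := rest2.reverse
    let trail_r := (pvSpan key true rev).1
    let r2 := (pvSpan key true rev).2
    if h2 : r2 = [] then (front ++ [lead ++ w1 ++ trail_r.reverse], back)
    else
      pvLoopB key ((pvSpan key false r2).2).reverse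
        (front ++ [lead ++ ((pvSpan key false r2).1).reverse])
        (back ++ [w1 ++ trail_r.reverse])
termination_by cur.length
decreasing_by exact pvLoop_dec key cur h1

def solve_alt (sentence : String) (delimiters : List String) : String :=
  let key := pvKey delimiters
  let fb := pvLoopB key sentence.toList [] []
  String.ofList (fb.1.flatten ++ fb.2.reverse.flatten)

-- ===== PRECONDITION & SPEC =====
def Spec_solve (sentence : String) (delimiters : List String) (out : String) : Prop := out = solve_alt sentence delimiters
instance (sentence : String) (delimiters : List String) (out : String) : Decidable (Spec_solve sentence delimiters out) := by unfold Spec_solve; infer_instance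

-- ===== CLAIM (what is proved, stated in full; the proofs are below) =====
def Claim_equal_solve : Prop := ∀ (sentence : String) (delimiters : List String), Dom_solve sentence delimiters → Spec_solve sentence delimiters (solve sentence delimiters)

-- ===== LEMMAS AND PROOFS =====

-- remaining span facts
theorem pvSpan_append (key : Char → Bool) (want : Bool) (l : List Char) :
    (pvSpan key want l).1 ++ (pvSpan key want l).2 = l := by
  induction l with
  | nil => simp [pvSpan]
  | cons c cs ih =>
    by_cases h : key c = want
    · rw [pvSpan_cons_pos key want c cs h]; simpa using ih
    · rw [pvSpan_cons_neg key want c cs h]; rfl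

theorem pvSpan_fst_all (key : Char → Bool) (want : Bool) (l : List Char) :
    ∀ c ∈ (pvSpan key want l).1, key c = want := by
  induction l with
  | nil => simp [pvSpan]
  | cons c cs ih =>
    by_cases h : key c = want
    · rw [pvSpan_cons_pos key want c cs h]
      intro d hd
      rcases List.mem_cons.mp hd with rfl | hd
      · exact h
      · exact ih d hd
    · rw [pvSpan_cons_neg key want c cs h]; simp

-- groupby structure lemmas
def pvMrg (k : Bool) (g : List Char) : List (Bool × List Char) → List (Bool × List Char)
  | [] => [(k, g)]
  | (k', g') :: rest => if k = k' then (k, g ++ g') :: rest else (k, g) :: (k', g') :: rest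

theorem pvGroupBy_cons (key : Char → Bool) (c : Char) (cs : List Char) :
    pvGroupBy key (c :: cs) = pvMrg (key c) [c] (pvGroupBy key cs) := by
  simp only [pvGroupBy]
  cases pvGroupBy key cs with
  | nil => rfl
  | cons p rest => obtain ⟨k, g⟩ := p; simp [pvMrg]

theorem pvG_head (key : Char → Bool) (c : Char) (cs : List Char) :
    ∃ g rest, pvGroupBy key (c :: cs) = (key c, g) :: rest := by
  rw [pvGroupBy_cons]
  cases h : pvGroupBy key cs with
  | nil => exact ⟨[c], [], rfl⟩
  | cons p r =>
    obtain ⟨k', g'⟩ := p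
    by_cases hk : key c = k' <;> simp [pvMrg, hk]

theorem pvMrg_append (k : Bool) (g : List Char) (p : Bool × List Char)
    (ps qs : List (Bool × List Char)) :
    pvMrg k g ((p :: ps) ++ qs) = pvMrg k g (p :: ps) ++ qs := by
  obtain ⟨k', g'⟩ := p
  by_cases h : k = k' <;> simp [pvMrg, h]

theorem pvG_append (key : Char → Bool) (xs' : List Char) (x y : Char) (ys' : List Char)
    (h : key x ≠ key y) :
    pvGroupBy key ((xs' ++ [x]) ++ (y :: ys'))
      = pvGroupBy key (xs' ++ [x]) ++ pvGroupBy key (y :: ys') := by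
  induction xs' with
  | nil =>
    obtain ⟨g, rest, hg⟩ := pvG_head key y ys'
    simp only [List.nil_append]
    rw [show (([x] ++ (y :: ys')) : List Char) = x :: (y :: ys') by simp,
        pvGroupBy_cons key x (y :: ys'), hg]
    simp [pvMrg, h, pvGroupBy]
  | cons a as ih =>
    have hcons : ((a :: as) ++ [x]) ++ (y :: ys') = a :: ((as ++ [x]) ++ (y :: ys')) := by simp
    obtain ⟨c', cs', hc⟩ : ∃ c' cs', as ++ [x] = c' :: cs' := by
      cases as with
      | nil => exact ⟨x, [], rfl⟩
      | cons b bs => exact ⟨b, bs ++ [x], by simp⟩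
    obtain ⟨g, rest, hg⟩ := pvG_head key c' cs'
    have h3 : pvGroupBy key ((a :: as) ++ [x]) = pvMrg (key a) [a] ((key c', g) :: rest) := by
      rw [show ((a :: as) ++ [x] : List Char) = a :: (c' :: cs') by rw [List.cons_append, hc],
          pvGroupBy_cons key a (c' :: cs'), hg]
    rw [hcons, pvGroupBy_cons key a ((as ++ [x]) ++ (y :: ys')), ih, hc, hg, pvMrg_append, h3]

theorem pvG_uniform (key : Char → Bool) (w : Bool) (l : List Char) (hl : l ≠ [])
    (h : ∀ c ∈ l, key c = w) : pvGroupBy key l = [(w, l)] := by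
  induction l with
  | nil => simp at hl
  | cons c cs ih =>
    have hc : key c = w := h c (by simp)
    cases cs with
    | nil => simp [pvGroupBy, hc]
    | cons d ds =>
      rw [pvGroupBy_cons, ih (by simp) (fun e he => h e (by simp [he]))]
      simp [pvMrg, hc]

def pvTrun (w : Bool) (p : List Char) : List (Bool × List Char) :=
  if p = [] then [] else [(w, p)]

theorem pvG_run_append (key : Char → Bool) (w : Bool) (p ys : List Char)
    (hp : ∀ c ∈ p, key c = w)
    (hy : ys = [] ∨ ∃ d ds, ys = d :: ds ∧ key d = !w) :
    pvGroupBy key (p ++ ys) = pvTrun w p ++ pvGroupBy key ys := by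
  rcases eq_or_ne p [] with rfl | hpne
  · simp [pvTrun]
  · rcases hy with rfl | ⟨d, ds, rfl, hd⟩
    · simp [pvTrun, hpne, pvG_uniform key w p hpne hp, pvGroupBy]
    · obtain ⟨p', x, rfl⟩ : ∃ p' x, p = p' ++ [x] :=
        ⟨p.dropLast, p.getLast hpne, (List.dropLast_append_getLast hpne).symm⟩
      have hx : key x = w := hp x (by simp)
      have hxd : key x ≠ key d := by rw [hx, hd]; cases w <;> simp
      rw [pvG_append key p' x d ds hxd,
          pvG_uniform key w (p' ++ [x]) (by simp) hp]
      simp [pvTrun]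

-- words and reassembly normal form
def pvWordsOf (gs : List (Bool × List Char)) : List (List Char) :=
  (gs.filter (fun p => !p.1)).map (fun p => p.2)

def pvAsm : List (List Char) → List (Bool × List Char) → List Char
  | _, [] => []
  | ws, (true, g) :: rest => g ++ pvAsm ws rest
  | [], (false, _) :: rest => pvAsm [] rest
  | w :: ws, (false, _) :: rest => w ++ pvAsm ws rest

theorem pvWordsOf_true (g : List Char) (rest : List (Bool × List Char)) :
    pvWordsOf ((true, g) :: rest) = pvWordsOf rest := by simp [pvWordsOf]

theorem pvWordsOf_false (g : List Char) (rest : List (Bool × List Char)) :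
    pvWordsOf ((false, g) :: rest) = g :: pvWordsOf rest := by simp [pvWordsOf]

theorem pvWordsOf_append (gs hs : List (Bool × List Char)) :
    pvWordsOf (gs ++ hs) = pvWordsOf gs ++ pvWordsOf hs := by
  simp [pvWordsOf]

theorem pvWordsOf_Trun_true (p : List Char) : pvWordsOf (pvTrun true p) = [] := by
  unfold pvTrun; split <;> simp [pvWordsOf]

theorem pvAsm_append (ws : List (List Char)) (gs hs : List (Bool × List Char)) :
    pvAsm ws (gs ++ hs) = pvAsm ws gs ++ pvAsm (ws.drop (pvWordsOf gs).length) hs := by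
  induction gs generalizing ws with
  | nil => simp [pvAsm, pvWordsOf]
  | cons p rest ih =>
    obtain ⟨b, g⟩ := p
    cases b with
    | true => simp only [List.cons_append, pvAsm, pvWordsOf_true, ih, List.append_assoc]
    | false =>
      cases ws with
      | nil => simp only [List.cons_append, pvAsm, pvWordsOf_false, ih, List.drop_nil]
      | cons w ws' =>
        simp only [List.cons_append, pvAsm, pvWordsOf_false, ih, List.length_cons,
          List.drop_succ_cons, List.append_assoc]

theorem pvAsm_truncate (ws extra : List (List Char)) (gs : List (Bool × List Char))
    (h : (pvWordsOf gs).length ≤ ws.length) :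
    pvAsm (ws ++ extra) gs = pvAsm ws gs := by
  induction gs generalizing ws with
  | nil => simp [pvAsm]
  | cons p rest ih =>
    obtain ⟨b, g⟩ := p
    cases b with
    | true => simp only [pvAsm]; rw [ih ws (by simpa [pvWordsOf_true] using h)]
    | false =>
      cases ws with
      | nil => simp [pvWordsOf_false] at h
      | cons w ws' =>
        simp only [List.cons_append, pvAsm]
        rw [ih ws' (by simpa [pvWordsOf_false] using h)]

theorem pvAsm_Trun_true (ws : List (List Char)) (p : List Char)
    (rest : List (Bool × List Char)) :
    pvAsm ws (pvTrun true p ++ rest) = p ++ pvAsm ws rest := by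
  unfold pvTrun; split
  · simp_all
  · simp [pvAsm]

theorem pvAsm_Trun_true' (ws : List (List Char)) (p : List Char) :
    pvAsm ws (pvTrun true p) = p := by
  unfold pvTrun; split
  · simp_all [pvAsm]
  · cases ws <;> simp [pvAsm]

theorem pvAsm_false_cons (w : List Char) (ws : List (List Char)) (g : List Char)
    (rest : List (Bool × List Char)) :
    pvAsm (w :: ws) ((false, g) :: rest) = w ++ pvAsm ws rest := rfl

-- the common normal form
def pvN (key : Char → Bool) (l : List Char) : List Char :=
  pvAsm (pvWordsOf (pvGroupBy key l)).reverse (pvGroupBy key l)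

-- ===== A equals the normal form =====
theorem pvStepA_fold (gs : List (Bool × List Char)) (ws : List (List Char)) (acc : List Char) :
    (gs.foldl pvStepA (ws, acc)).2 = acc ++ pvAsm ws.reverse gs := by
  induction gs generalizing ws acc with
  | nil => simp [pvAsm]
  | cons p rest ih =>
    obtain ⟨b, g⟩ := p
    cases b with
    | true =>
      have hstep : pvStepA (ws, acc) (true, g) = (ws, acc ++ g) := by simp [pvStepA]
      rw [List.foldl_cons, hstep, ih]
      simp [pvAsm]
    | false =>
      rcases eq_or_ne ws [] with rfl | hne
      · have hstep : pvStepA (([] : List (List Char)), acc) (false, g) = ([], acc) := by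
          simp [pvStepA, PySem.List.pop?, PySem.List.pyIdx?]
        rw [List.foldl_cons, hstep, ih]
        simp [pvAsm]
      · obtain ⟨t, w, rfl⟩ : ∃ t w, ws = t ++ [w] :=
          ⟨ws.dropLast, ws.getLast hne, (List.dropLast_append_getLast hne).symm⟩
        have hstep : pvStepA (t ++ [w], acc) (false, g) = (t, acc ++ w) := by
          simp [pvStepA, PySem.List.pop?_last]
        rw [List.foldl_cons, hstep, ih]
        simp [pvAsm_false_cons]

theorem pvWords_fold (gs : List (Bool × List Char)) (acc : List (List Char)) :
    gs.foldl (fun ws p => if !p.1 then ws ++ [p.2] else ws) acc = acc ++ pvWordsOf gs := by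
  induction gs generalizing acc with
  | nil => simp [pvWordsOf]
  | cons p rest ih =>
    obtain ⟨b, g⟩ := p
    cases b with
    | true => simpa [pvWordsOf_true] using ih acc
    | false => simpa [pvWordsOf_false] using ih (acc ++ [g])

theorem pvA_eq_N (sentence : String) (delimiters : List String) :
    solve sentence delimiters = String.ofList (pvN (pvKey delimiters) sentence.toList) := by
  unfold solve pvN
  simp only [pvWords_fold, pvStepA_fold]
  simp

-- ===== B equals the normal form =====
theorem pvN_delims (key : Char → Bool) (l : List Char) (h : ∀ c ∈ l, key c = true) :
    pvN key l = l := by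
  cases l with
  | nil => simp [pvN, pvGroupBy, pvAsm, pvWordsOf]
  | cons c cs =>
    unfold pvN
    rw [pvG_uniform key true (c :: cs) (by simp) h]
    simp [pvAsm]

theorem pvLoopB_eq (key : Char → Bool) (n : Nat) :
    ∀ cur : List Char, cur.length ≤ n → ∀ front back : List (List Char),
    ((pvLoopB key cur front back).1).flatten ++ ((pvLoopB key cur front back).2).reverse.flatten
      = front.flatten ++ pvN key cur ++ back.reverse.flatten := by
  induction n with
  | zero =>
    intro cur hlen front back
    have : cur = [] := List.eq_nil_of_length_eq_zero (Nat.le_zero.mp hlen)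
    subst this
    rw [pvLoopB]
    simp [pvSpan, pvN, pvGroupBy, pvAsm, pvWordsOf]
  | succ m ih =>
    intro cur hlen front back
    rw [pvLoopB]
    by_cases h1 : (pvSpan key true cur).2 = []
    · simp only [h1, dite_true]
      have hcur : cur = (pvSpan key true cur).1 := by
        conv_lhs => rw [← pvSpan_append key true cur]
        rw [h1, List.append_nil]
      rw [pvN_delims key cur (by rw [hcur]; exact fun c hc => pvSpan_fst_all key true cur c hc),
          ← hcur]
      simp
    · simp only [dif_neg h1]
      set lead := (pvSpan key true cur).1 with hlead
      set rest := (pvSpan key true cur).2 with hrest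
      set w1 := (pvSpan key false rest).1 with hw1
      set rest2 := (pvSpan key false rest).2 with hrest2
      set rev := rest2.reverse with hrev
      set trail_r := (pvSpan key true rev).1 with htrail
      set r2 := (pvSpan key true rev).2 with hr2
      clear_value lead rest w1 rest2 rev trail_r r2
      obtain ⟨c, cs, hc⟩ := List.exists_cons_of_ne_nil h1
      have hkc : key c = false := by simpa using pvSpan_snd_head key true cur c cs (by rw [← hrest]; exact hc)
      have hw1c : w1 = c :: (pvSpan key false cs).1 := by
        rw [hw1, hc, pvSpan_cons_pos key false c cs hkc]
      have hw1ne : w1 ≠ [] := by rw [hw1c]; simp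
      have hw1all : ∀ e ∈ w1, key e = false := by
        intro e he; rw [hw1] at he; exact pvSpan_fst_all key false rest e he
      have hTw1 : pvTrun false w1 = [(false, w1)] := by unfold pvTrun; rw [if_neg hw1ne]
      have hsplit1 : cur = lead ++ rest := by
        rw [hlead, hrest]; exact (pvSpan_append key true cur).symm
      have hsplit2 : rest = w1 ++ rest2 := by
        rw [hw1, hrest2]; exact (pvSpan_append key false rest).symm
      have hleadall : ∀ e ∈ lead, key e = true := by
        intro e he; rw [hlead] at he; exact pvSpan_fst_all key true cur e he
      have hsplit3 : rev = trail_r ++ r2 := by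
        rw [htrail, hr2]; exact (pvSpan_append key true rev).symm
      have htrailall : ∀ e ∈ trail_r.reverse, key e = true := by
        intro e he; rw [htrail] at he
        exact pvSpan_fst_all key true rev e (List.mem_reverse.mp he)
      by_cases h2 : r2 = []
      · simp only [h2, dite_true]
        -- exactly one word: cur = lead ++ w1 ++ rest2 and rest2 = trail_r.reverse
        have hrest2eq : rest2 = trail_r.reverse := by
          have h' : rest2.reverse = trail_r := by rw [← hrev, hsplit3, h2]; simp
          rw [← h']; simp
        have hyrest2 : rest2 = [] ∨ ∃ d ds, rest2 = d :: ds ∧ key d = (!false) := by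
          rcases eq_or_ne rest2 [] with hre | hre
          · exact Or.inl hre
          · obtain ⟨d, ds, hd⟩ := List.exists_cons_of_ne_nil hre
            refine Or.inr ⟨d, ds, hd, ?_⟩
            have hdm : d ∈ trail_r.reverse := by rw [← hrest2eq, hd]; simp
            simpa using htrailall d hdm
        have hGrest2 : pvGroupBy key rest2 = pvTrun true rest2 := by
          rcases eq_or_ne rest2 [] with hre | hre
          · simp [hre, pvTrun, pvGroupBy]
          · rw [pvG_uniform key true rest2 hre
                (fun e he => htrailall e (by rw [← hrest2eq]; exact he))]
            unfold pvTrun; rw [if_neg hre]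
        have hG : pvGroupBy key cur
            = pvTrun true lead ++ ((false, w1) :: pvTrun true rest2) := by
          rw [hsplit1, pvG_run_append key true lead rest hleadall
                (Or.inr ⟨c, cs, hc, by simp [hkc]⟩), hsplit2,
              pvG_run_append key false w1 rest2 hw1all hyrest2, hGrest2, hTw1]
          simp
        have hN : pvN key cur = lead ++ w1 ++ rest2 := by
          unfold pvN
          rw [hG, pvWordsOf_append, pvWordsOf_Trun_true, pvWordsOf_false,
              pvWordsOf_Trun_true]
          simp only [List.nil_append, List.reverse_cons, List.reverse_nil]
          rw [pvAsm_Trun_true, pvAsm_false_cons, pvAsm_Trun_true']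
          simp
        rw [hN, hrest2eq]
        simp
      · simp only [dif_neg h2]
        -- at least two words
        obtain ⟨d, ds, hd⟩ := List.exists_cons_of_ne_nil h2
        have hkd : key d = false := by
          simpa using pvSpan_snd_head key true rev d ds (by rw [← hr2]; exact hd)
        set wlast_r := (pvSpan key false r2).1 with hwl
        set mid_r := (pvSpan key false r2).2 with hmid
        set mid := mid_r.reverse with hmidrev
        clear_value wlast_r mid_r mid
        have hwlc : wlast_r = d :: (pvSpan key false ds).1 := by
          rw [hwl, hd, pvSpan_cons_pos key false d ds hkd]
        have hwlrne : wlast_r.reverse ≠ [] := by rw [hwlc]; simp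
        obtain ⟨w0, ws0, hw0⟩ := List.exists_cons_of_ne_nil hwlrne
        have hwlall : ∀ e ∈ wlast_r.reverse, key e = false := by
          intro e he; rw [hwl] at he
          exact pvSpan_fst_all key false r2 e (List.mem_reverse.mp he)
        have hkw0 : key w0 = false := hwlall w0 (by rw [hw0]; simp)
        have hsplit4 : r2 = wlast_r ++ mid_r := by
          rw [hwl, hmid]; exact (pvSpan_append key false r2).symm
        have hrest2eq : rest2 = mid ++ wlast_r.reverse ++ trail_r.reverse := by
          have h' : rest2 = (trail_r ++ (wlast_r ++ mid_r)).reverse := by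
            rw [← hsplit4, ← hsplit3, hrev]; simp
          rw [h', hmidrev]
          simp [List.reverse_append, List.append_assoc]
        have hre2ne : rest2 ≠ [] := by
          intro h0
          apply h2
          have h4 : trail_r ++ r2 = [] := by rw [← hsplit3, hrev, h0]; rfl
          exact (List.append_eq_nil_iff.mp h4).2
        obtain ⟨f, fs, hf⟩ := List.exists_cons_of_ne_nil hre2ne
        have hkf : key f = true := by
          simpa using pvSpan_snd_head key false rest f fs (by rw [← hrest2]; exact hf)
        have hmidne : mid_r ≠ [] := by
          intro hmnil
          have h5 : rest2 = w0 :: (ws0 ++ trail_r.reverse) := by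
            rw [hrest2eq, hmidrev, hmnil, hw0]; simp
          rw [hf] at h5
          have hfw : f = w0 := by simpa using congrArg List.head? h5
          rw [hfw, hkw0] at hkf
          exact Bool.false_ne_true hkf
        obtain ⟨e, es, he⟩ := List.exists_cons_of_ne_nil hmidne
        have hke : key e = true := by
          simpa using pvSpan_snd_head key false r2 e es (by rw [← hmid]; exact he)
        have hmide : mid = es.reverse ++ [e] := by rw [hmidrev, he]; simp
        -- groups of the trailing part
        have hytrail : trail_r.reverse = [] ∨ ∃ t0 ts0, trail_r.reverse = t0 :: ts0 ∧ key t0 = (!false) := by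
          rcases eq_or_ne trail_r.reverse [] with ht | ht
          · exact Or.inl ht
          · obtain ⟨t0, ts0, ht0⟩ := List.exists_cons_of_ne_nil ht
            exact Or.inr ⟨t0, ts0, ht0, by simpa using htrailall t0 (by rw [ht0]; simp)⟩
        have hGtrail : pvGroupBy key trail_r.reverse = pvTrun true trail_r.reverse := by
          rcases eq_or_ne trail_r.reverse [] with ht | ht
          · simp [ht, pvTrun, pvGroupBy]
          · rw [pvG_uniform key true trail_r.reverse ht htrailall]
            unfold pvTrun; rw [if_neg ht]
        have hTwl : pvTrun false wlast_r.reverse = [(false, wlast_r.reverse)] := by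
          unfold pvTrun; rw [if_neg hwlrne]
        have hGwt : pvGroupBy key (wlast_r.reverse ++ trail_r.reverse)
            = (false, wlast_r.reverse) :: pvTrun true trail_r.reverse := by
          rw [pvG_run_append key false wlast_r.reverse trail_r.reverse hwlall hytrail,
              hGtrail, hTwl]
          simp
        have hGrest2 : pvGroupBy key rest2
            = pvGroupBy key mid ++ ((false, wlast_r.reverse) :: pvTrun true trail_r.reverse) := by
          have hstep : rest2 = (es.reverse ++ [e]) ++ (w0 :: (ws0 ++ trail_r.reverse)) := by
            rw [hrest2eq, hmide, hw0]; simp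
          rw [hstep, pvG_append key es.reverse e w0 (ws0 ++ trail_r.reverse)
                (by rw [hke, hkw0]; simp), ← hmide]
          congr 1
          rw [show w0 :: (ws0 ++ trail_r.reverse) = wlast_r.reverse ++ trail_r.reverse by
                rw [hw0]; simp]
          exact hGwt
        have hG : pvGroupBy key cur
            = pvTrun true lead ++ ((false, w1)
                :: (pvGroupBy key mid ++ ((false, wlast_r.reverse) :: pvTrun true trail_r.reverse))) := by
          rw [hsplit1, pvG_run_append key true lead rest hleadall
                (Or.inr ⟨c, cs, hc, by simp [hkc]⟩), hsplit2,
              pvG_run_append key false w1 rest2 hw1all (Or.inr ⟨f, fs, hf, by simp [hkf]⟩),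
              hGrest2, hTw1]
          simp
        -- normal-form computation
        have hN : pvN key cur
            = lead ++ wlast_r.reverse ++ pvN key mid ++ w1 ++ trail_r.reverse := by
          unfold pvN
          rw [hG]
          have hwords : pvWordsOf (pvTrun true lead ++ ((false, w1)
              :: (pvGroupBy key mid ++ ((false, wlast_r.reverse) :: pvTrun true trail_r.reverse))))
              = w1 :: (pvWordsOf (pvGroupBy key mid) ++ [wlast_r.reverse]) := by
            rw [pvWordsOf_append, pvWordsOf_Trun_true, pvWordsOf_false, pvWordsOf_append,
                pvWordsOf_false, pvWordsOf_Trun_true]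
            simp
          rw [hwords]
          have hrevw : (w1 :: (pvWordsOf (pvGroupBy key mid) ++ [wlast_r.reverse])).reverse
              = wlast_r.reverse :: ((pvWordsOf (pvGroupBy key mid)).reverse ++ [w1]) := by
            simp
          rw [hrevw, pvAsm_Trun_true, pvAsm_false_cons, pvAsm_append]
          rw [pvAsm_truncate (pvWordsOf (pvGroupBy key mid)).reverse [w1]
                (pvGroupBy key mid) (by simp)]
          have hdrop : ((pvWordsOf (pvGroupBy key mid)).reverse ++ [w1]).drop
                (pvWordsOf (pvGroupBy key mid)).length = [w1] := by
            rw [show (pvWordsOf (pvGroupBy key mid)).length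
                  = (pvWordsOf (pvGroupBy key mid)).reverse.length by simp]
            exact List.drop_left
          rw [hdrop, pvAsm_false_cons, pvAsm_Trun_true']
          simp
        have hmidlen : mid.length ≤ m := by
          have hdec := pvLoop_dec key cur (by rw [← hrest]; exact h1)
          rw [← hrest, ← hrest2, ← hrev, ← hr2, ← hmid, ← hmidrev] at hdec
          omega
        rw [ih mid hmidlen, hN]
        simp

theorem pvB_eq_N (sentence : String) (delimiters : List String) :
    solve_alt sentence delimiters = String.ofList (pvN (pvKey delimiters) sentence.toList) := by
  unfold solve_alt
  simp only [pvLoopB_eq (pvKey delimiters) sentence.toList.length sentence.toList (le_refl _)]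
  simp

-- ===== VERDICT (by name: the statement is the Claim_ definition above) =====
theorem solve_spec : Claim_equal_solve := by
  intro sentence delimiters _
  unfold Spec_solve
  rw [pvA_eq_N, pvB_eq_N]
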